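-- pv_equiv track=rewrite | github.com/athenarc/smpc-analytics | ID3/id3_branchless_db.py | all_examples_same
-- ===== SOURCE A (Python) =====
-- original_examples = [[0,0,1,0,1],
--                     [0,0,1,1,1],
--                     [1,0,1,0,0],
--                     [2,1,1,0,0],
--                     [2,2,0,0,0],
--                     [2,2,0,1,1],
--                     [1,2,0,1,0],
--                     [0,1,1,0,1],
--                     [0,2,0,0,0],
--                     [2,1,0,0,0],
--                     [0,1,0,1,0],
--                     [1,1,1,1,0],
--                     [1,0,0,0,0],
--                     [2,1,1,1,1]]
--
-- possible_values = {0:[0, 1, 2],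
--                     1:[0, 1, 2],
--                     2:[0, 1, -1],
--                     3:[0, 1, -1],
--                     4:[0, 1, -1]}
--
-- class_attribute = 4
--
-- def all_examples_same(example_indexes):
--     res = 0
--     class_counts = [0]*len(possible_values[class_attribute])
--     label_column = [row[class_attribute] for row in original_examples]
--     for i in range(len(possible_values[class_attribute])):
--         neq = int(i != -1)
--         for index in range(len(example_indexes)):
--             class_counts[i] += int(label_column[index] == i) * neq * (example_indexes[index] != 0)
--         res += int(class_counts[i] == sum(example_indexes))
--     return res
-- ===== SOURCE B (Python) =====
-- # B: single pass building a label tally (dict), then compare each class count to the index-sum.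
-- original_examples = [[0,0,1,0,1],
--                     [0,0,1,1,1],
--                     [1,0,1,0,0],
--                     [2,1,1,0,0],
--                     [2,2,0,0,0],
--                     [2,2,0,1,1],
--                     [1,2,0,1,0],
--                     [0,1,1,0,1],
--                     [0,2,0,0,0],
--                     [2,1,0,0,0],
--                     [0,1,0,1,0],
--                     [1,1,1,1,0],
--                     [1,0,0,0,0],
--                     [2,1,1,1,1]]
--
-- class_attribute = 4
--
-- def all_examples_same(example_indexes):
--     label_column = [row[class_attribute] for row in original_examples]
--     active = [label_column[index] for index in range(len(example_indexes))
--               if example_indexes[index] != 0]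
--     tally = {}
--     for label in active:
--         tally[label] = tally.get(label, 0) + 1
--     s = sum(example_indexes)
--     return sum(1 for v in (0, 1, 2) if tally.get(v, 0) == s)
-- ===== Notes on version B (the rewrite author's own statement) =====
-- stated objective: alternative
-- what changed: A runs one scan of example_indexes per class value (three passes, mutating a class_counts list); B does a single pass that collects the active labels and tallies them in a dict, then compares each of the three tallies to the index-sum.
import Mathlib
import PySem

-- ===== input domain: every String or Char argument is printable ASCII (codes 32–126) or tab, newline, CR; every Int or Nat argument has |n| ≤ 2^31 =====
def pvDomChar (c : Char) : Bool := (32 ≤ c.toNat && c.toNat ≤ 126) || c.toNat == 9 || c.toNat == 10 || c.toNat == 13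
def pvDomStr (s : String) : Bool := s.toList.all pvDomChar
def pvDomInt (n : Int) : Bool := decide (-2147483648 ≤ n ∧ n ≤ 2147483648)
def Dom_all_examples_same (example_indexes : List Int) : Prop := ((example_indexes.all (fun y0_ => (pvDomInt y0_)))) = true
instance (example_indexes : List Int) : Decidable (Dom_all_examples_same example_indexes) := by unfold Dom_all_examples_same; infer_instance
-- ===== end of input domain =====

-- B merges A's three per-class scans into one pass that tallies labels in a dict; same return value.

-- module constant original_examples
def pvOriginalExamples : List (List Int) :=
  [[0,0,1,0,1], [0,0,1,1,1], [1,0,1,0,0], [2,1,1,0,0], [2,2,0,0,0],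
   [2,2,0,1,1], [1,2,0,1,0], [0,1,1,0,1], [0,2,0,0,0], [2,1,0,0,0],
   [0,1,0,1,0], [1,1,1,1,0], [1,0,0,0,0], [2,1,1,1,1]]

-- ===== PORT A =====
-- indexing via pyGetD is exact under Pre_ (all indexes in range; Python raises IndexError beyond)
-- the inner 'for index in range(len(example_indexes))' loop of A
def pvInnerA (example_indexes label_column : List Int) (i neq : Int) (cc : List Int) : List Int :=
  (PySem.List.pyRange 0 (example_indexes.length : Int) 1).foldl
    (fun cc index =>
      PySem.List.pySetD cc i (PySem.List.pyGetD cc i 0 +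
        (if PySem.List.pyGetD label_column index 0 = i then (1:Int) else 0) * neq *
        (if PySem.List.pyGetD example_indexes index 0 ≠ 0 then (1:Int) else 0)))
    cc

def all_examples_same (example_indexes : List Int) : Int :=
  let possible_vals : List Int := [0, 1, -1]        -- possible_values[class_attribute]
  let class_counts : List Int := List.replicate possible_vals.length 0
  let label_column : List Int := pvOriginalExamples.map (fun row => PySem.List.pyGetD row 4 0)
  let st := (PySem.List.pyRange 0 (possible_vals.length : Int) 1).foldl
    (fun (st : List Int × Int) i =>
      let neq : Int := if i ≠ -1 then 1 else 0
      let cc := pvInnerA example_indexes label_column i neq st.1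
      (cc, st.2 + (if PySem.List.pyGetD cc i 0 = example_indexes.sum then (1:Int) else 0)))
    (class_counts, 0)
  st.2

-- ===== PORT B =====
def all_examples_same_alt (example_indexes : List Int) : Int :=
  let label_column : List Int := pvOriginalExamples.map (fun row => PySem.List.pyGetD row 4 0)
  let active : List Int :=
    ((PySem.List.pyRange 0 (example_indexes.length : Int) 1).filter
        (fun index => decide (PySem.List.pyGetD example_indexes index 0 ≠ 0))).map
      (fun index => PySem.List.pyGetD label_column index 0)
  let tally : PySem.Dict Int Int :=
    active.foldl (fun d label => d.insert label (d.getD label 0 + 1)) PySem.Dict.empty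
  let s : Int := example_indexes.sum
  (([0, 1, 2] : List Int).map (fun v => if tally.getD v 0 = s then (1:Int) else 0)).sum

-- ===== PRECONDITION & SPEC =====
-- Pre_ excludes exactly the inputs where A raises IndexError (label_column has 14 entries)
def Pre_all_examples_same (example_indexes : List Int) : Prop := example_indexes.length ≤ 14
instance (example_indexes : List Int) : Decidable (Pre_all_examples_same example_indexes) := by
  unfold Pre_all_examples_same; infer_instance
def pvWitness_all_examples_same : List Int := [1, 0, 2]

def Spec_all_examples_same (example_indexes : List Int) (out : Int) : Prop := out = all_examples_same_alt example_indexes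
instance (example_indexes : List Int) (out : Int) : Decidable (Spec_all_examples_same example_indexes out) := by unfold Spec_all_examples_same; infer_instance

-- ===== CLAIM (what is proved, stated in full; the proofs are below) =====
def Claim_equal_all_examples_same : Prop := ∀ (example_indexes : List Int), Dom_all_examples_same example_indexes → Pre_all_examples_same example_indexes → Spec_all_examples_same example_indexes (all_examples_same example_indexes)

-- ===== LEMMAS AND PROOFS =====

-- A's inner loop keeps the length of class_counts
theorem pv_foldl_set_length (i : Int) (f : Int → Int) (l : List Int) :
    ∀ cc : List Int,
      (l.foldl (fun cc index => PySem.List.pySetD cc i (PySem.List.pyGetD cc i 0 + f index)) cc).length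
        = cc.length := by
  induction l with
  | nil => intro cc; rfl
  | cons a t ih =>
      intro cc
      simp only [List.foldl_cons]
      rw [ih, PySem.List.length_pySetD]

-- A's inner loop adds, at slot i, the sum of the per-index terms
theorem pv_foldl_set_get_self (i : Int) (hi : 0 ≤ i) (f : Int → Int) (l : List Int) :
    ∀ cc : List Int, i.toNat < cc.length →
      PySem.List.pyGetD
          (l.foldl (fun cc index => PySem.List.pySetD cc i (PySem.List.pyGetD cc i 0 + f index)) cc) i 0
        = PySem.List.pyGetD cc i 0 + (l.map f).sum := by
  induction l with
  | nil => intro cc _; simp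
  | cons a t ih =>
      intro cc hlen
      simp only [List.foldl_cons]
      rw [ih _ (by rw [PySem.List.length_pySetD]; exact hlen)]
      have hcast : i = ((i.toNat : Nat) : Int) := (Int.toNat_of_nonneg hi).symm
      rw [hcast, PySem.List.pyGetD_pySetD_natCast _ _ _ _ _ hlen, if_pos rfl]
      simp only [List.map_cons, List.sum_cons]
      ring

-- A's inner loop leaves other slots unchanged
theorem pv_foldl_set_get_ne (i j : Int) (hi : 0 ≤ i) (hj : 0 ≤ j) (hij : j ≠ i) (f : Int → Int) (l : List Int) :
    ∀ cc : List Int, i.toNat < cc.length →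
      PySem.List.pyGetD
          (l.foldl (fun cc index => PySem.List.pySetD cc i (PySem.List.pyGetD cc i 0 + f index)) cc) j 0
        = PySem.List.pyGetD cc j 0 := by
  induction l with
  | nil => intro cc _; rfl
  | cons a t ih =>
      intro cc hlen
      simp only [List.foldl_cons]
      rw [ih _ (by rw [PySem.List.length_pySetD]; exact hlen)]
      have hcast : i = ((i.toNat : Nat) : Int) := (Int.toNat_of_nonneg hi).symm
      have hcastj : j = ((j.toNat : Nat) : Int) := (Int.toNat_of_nonneg hj).symm
      rw [hcast, hcastj, PySem.List.pyGetD_pySetD_natCast _ _ _ _ _ hlen]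
      rw [if_neg (by omega)]

-- a filtered-mapped count written as A's 0/1-product sum
theorem count_filter_map_eq_sum (R : List Int) (f : Int → Int)
    (q : Int → Prop) [DecidablePred q] (i : Int) :
    ((((R.filter (fun x => decide (q x))).map f).count i : Int))
      = (R.map (fun x => (if f x = i then (1:Int) else 0) * (if q x then (1:Int) else 0))).sum := by
  induction R with
  | nil => simp
  | cons a t ih =>
      simp only [List.filter_cons, List.map_cons, List.sum_cons]
      by_cases hq : q a
      · by_cases hf : f a = i
        · simp only [hq, decide_true, List.map_cons, List.count_cons, hf,
            beq_self_eq_true, if_pos]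
          push_cast
          linarith [ih]
        · have : (f a == i) = false := by simp [hf]
          simp only [hq, decide_true, ite_true, List.map_cons, List.count_cons, this,
            if_neg hf, zero_mul, zero_add]
          exact ih
      · simp only [hq, decide_false, ite_false, mul_zero, zero_add,
          Bool.false_eq_true]
        exact ih

-- instances of the fold lemmas for A's inner loop
theorem pvInnerA_length (ei lc : List Int) (i neq : Int) (cc : List Int) :
    (pvInnerA ei lc i neq cc).length = cc.length := by
  unfold pvInnerA
  exact pv_foldl_set_length i _ _ cc

theorem pvInnerA_get_self (ei lc : List Int) (i neq : Int) (hi : 0 ≤ i)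
    (cc : List Int) (hlen : i.toNat < cc.length) :
    PySem.List.pyGetD (pvInnerA ei lc i neq cc) i 0
      = PySem.List.pyGetD cc i 0 +
        ((PySem.List.pyRange 0 (ei.length : Int) 1).map
          (fun index =>
            (if PySem.List.pyGetD lc index 0 = i then (1:Int) else 0) * neq *
            (if PySem.List.pyGetD ei index 0 ≠ 0 then (1:Int) else 0))).sum := by
  unfold pvInnerA
  exact pv_foldl_set_get_self i hi _ _ cc hlen

theorem pvInnerA_get_ne (ei lc : List Int) (i neq j : Int) (hi : 0 ≤ i) (hj : 0 ≤ j)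
    (hij : j ≠ i) (cc : List Int) (hlen : i.toNat < cc.length) :
    PySem.List.pyGetD (pvInnerA ei lc i neq cc) j 0 = PySem.List.pyGetD cc j 0 := by
  unfold pvInnerA
  exact pv_foldl_set_get_ne i j hi hj hij _ _ cc hlen

-- ===== VERDICT (by name: the statement is the Claim_ definition above) =====
theorem all_examples_same_spec : Claim_equal_all_examples_same := by
  intro ei _ _
  unfold Spec_all_examples_same
  simp only [all_examples_same, all_examples_same_alt]
  have hR : PySem.List.pyRange 0 ((([0, 1, -1] : List Int).length : Nat) : Int) 1 = [0, 1, 2] := by decide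
  rw [hR]
  simp only [List.foldl_cons, List.foldl_nil]
  have hrep : List.replicate ([0, 1, -1] : List Int).length (0:Int) = [0, 0, 0] := rfl
  have hn0 : (if (0:Int) ≠ -1 then (1:Int) else 0) = 1 := by norm_num
  have hn1 : (if (1:Int) ≠ -1 then (1:Int) else 0) = 1 := by norm_num
  have hn2 : (if (2:Int) ≠ -1 then (1:Int) else 0) = 1 := by norm_num
  rw [hrep, hn0, hn1, hn2]
  set lc : List Int := List.map (fun row => PySem.List.pyGetD row 4 0) pvOriginalExamples with hlc
  have hl3 : ([0, 0, 0] : List Int).length = 3 := rfl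
  have hlen1 : ((0:Int)).toNat < ([0, 0, 0] : List Int).length := by norm_num
  have hlen2 : ((1:Int)).toNat < (pvInnerA ei lc 0 1 [0, 0, 0]).length := by
    rw [pvInnerA_length]; norm_num
  have hlen3 : ((2:Int)).toNat < (pvInnerA ei lc 1 1 (pvInnerA ei lc 0 1 [0, 0, 0])).length := by
    rw [pvInnerA_length, pvInnerA_length]; norm_num
  rw [pvInnerA_get_self ei lc 0 1 (by norm_num) [0, 0, 0] hlen1]
  rw [pvInnerA_get_self ei lc 1 1 (by norm_num) _ hlen2]
  rw [pvInnerA_get_ne ei lc 0 1 1 (by norm_num) (by norm_num) (by norm_num) [0, 0, 0] hlen1]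
  rw [pvInnerA_get_self ei lc 2 1 (by norm_num) _ hlen3]
  rw [pvInnerA_get_ne ei lc 1 1 2 (by norm_num) (by norm_num) (by norm_num) _ hlen2]
  rw [pvInnerA_get_ne ei lc 0 1 2 (by norm_num) (by norm_num) (by norm_num) [0, 0, 0] hlen1]
  have hg0 : PySem.List.pyGetD ([0, 0, 0] : List Int) 0 0 = 0 := rfl
  have hg1 : PySem.List.pyGetD ([0, 0, 0] : List Int) 1 0 = 0 := rfl
  have hg2 : PySem.List.pyGetD ([0, 0, 0] : List Int) 2 0 = 0 := rfl
  rw [hg0, hg1, hg2]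
  simp only [List.map_cons, List.map_nil, List.sum_cons, List.sum_nil]
  simp only [PySem.Dict.getD_foldl_insert_add_one, PySem.Dict.getD_empty, zero_add]
  rw [count_filter_map_eq_sum (PySem.List.pyRange 0 (ei.length : Int) 1)
        (fun index => PySem.List.pyGetD lc index 0)
        (fun x => PySem.List.pyGetD ei x 0 ≠ 0) 0,
      count_filter_map_eq_sum (PySem.List.pyRange 0 (ei.length : Int) 1)
        (fun index => PySem.List.pyGetD lc index 0)
        (fun x => PySem.List.pyGetD ei x 0 ≠ 0) 1,
      count_filter_map_eq_sum (PySem.List.pyRange 0 (ei.length : Int) 1)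
        (fun index => PySem.List.pyGetD lc index 0)
        (fun x => PySem.List.pyGetD ei x 0 ≠ 0) 2]
  simp only [mul_one]
  ring
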